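-- pv_equiv track=rewrite | github.com/Isquare007/alx-interview | Turing/most_letter.py | SearchingChallenge
-- ===== SOURCE A (Python) =====
-- def SearchingChallenge(str):
--     words = str.split()
--     max_repeated_letters = 0
--     word_with_max_repeated_letters = ""
--
--     for word in words:
--         repeated_letters = {}
--         for letter in word:
--             if letter.isalpha():
--                 if letter.lower() in repeated_letters:
--                     repeated_letters[letter.lower()] += 1
--                 else:
--                     repeated_letters[letter.lower()] = 1
--
--         max_count = max(repeated_letters.values(), default=0)
--         if max_count > max_repeated_letters:
--             max_repeated_letters = max_count
--             word_with_max_repeated_letters = word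
--
--     if max_repeated_letters > 1:
--         return word_with_max_repeated_letters
--     else:
--         return -1
-- ===== SOURCE B (Python) =====
-- def SearchingChallenge(str):
--     max_repeated_letters = 0
--     word_with_max_repeated_letters = ""
--
--     for word in str.split():
--         letters = sorted(c.lower() for c in word if c.isalpha())
--         best = 0
--         cur = 0
--         prev = None
--         for c in letters:
--             cur = cur + 1 if c == prev else 1
--             if cur > best:
--                 best = cur
--             prev = c
--         if best > max_repeated_letters:
--             max_repeated_letters = best
--             word_with_max_repeated_letters = word
--
--     if max_repeated_letters > 1:
--         return word_with_max_repeated_letters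
--     else:
--         return -1
-- ===== Notes on version B (the rewrite author's own statement) =====
-- stated objective: alternative
-- what changed: Per-word top letter frequency is computed by sorting the word's lowercased alphabetic characters and scanning for the longest run of equal letters, instead of building a frequency dictionary and taking the max of its values.
-- outside the precondition, e.g. on SearchingChallenge('ab cd'): A returns -1, B returns -1; on SearchingChallenge(''): A returns -1, B returns -1
import Mathlib
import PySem

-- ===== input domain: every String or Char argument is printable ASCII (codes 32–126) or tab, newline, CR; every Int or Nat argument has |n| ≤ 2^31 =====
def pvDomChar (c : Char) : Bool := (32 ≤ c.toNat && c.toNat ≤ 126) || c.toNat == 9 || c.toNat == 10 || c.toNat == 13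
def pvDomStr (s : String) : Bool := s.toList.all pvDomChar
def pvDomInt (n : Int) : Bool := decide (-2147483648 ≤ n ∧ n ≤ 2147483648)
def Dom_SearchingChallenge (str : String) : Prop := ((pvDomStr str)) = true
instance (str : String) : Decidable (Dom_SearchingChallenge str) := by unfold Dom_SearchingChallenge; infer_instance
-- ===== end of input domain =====

-- B computes each word's top letter frequency by sorting its lowercased alphabetic
-- characters and scanning the longest run of equal letters, instead of A's frequency
-- dictionary (objective: alternative; same return value, including the int -1 sentinel
-- in Python, which the String-typed ports cannot express and Pre_ therefore excludes).

-- ===== PORT A =====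
-- inner loop of A: the letter-frequency dict of one word
def pvLetterDict (cs : List Char) : PySem.Dict Char Int :=
  cs.foldl (fun d letter =>
    if PySem.Chars.isalpha letter then
      if d.contains (PySem.Chars.lowerChar letter) then
        d.insert (PySem.Chars.lowerChar letter) (d.getD (PySem.Chars.lowerChar letter) 0 + 1)
      else
        d.insert (PySem.Chars.lowerChar letter) 1
    else d) PySem.Dict.empty

def SearchingChallenge (str : String) : String :=
  let words := PySem.Str.split₀ str
  let st := words.foldl (fun (st : Int × String) word =>
    let maxCount := PySem.List.maxD (pvLetterDict word.toList).values id 0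
    if maxCount > st.1 then (maxCount, word) else st) (0, "")
  if st.1 > 1 then st.2 else ""   -- here Python A returns the INT -1, inexpressible in the String return type; Pre_ excludes these inputs (Python B returns the identical -1 there)

-- ===== PORT B =====
-- inner loop of B: longest run of equal adjacent characters (state: best, cur, prev)
def pvRunStep (st : Int × Int × Option Char) (c : Char) : Int × Int × Option Char :=
  let cur := if (some c == st.2.2) then st.2.1 + 1 else 1
  (if cur > st.1 then cur else st.1, cur, some c)

def pvBestRun (cs : List Char) : Int := (cs.foldl pvRunStep (0, 0, none)).1

def SearchingChallenge_alt (str : String) : String :=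
  let st := (PySem.Str.split₀ str).foldl (fun (st : Int × String) word =>
    let best := pvBestRun (PySem.List.sorted ((word.toList.filter PySem.Chars.isalpha).map PySem.Chars.lowerChar) id)
    if best > st.1 then (best, word) else st) (0, "")
  if st.1 > 1 then st.2 else ""   -- here Python B returns the INT -1, same as A; inexpressible in the String return type, so outside Pre_

-- ===== PRECONDITION & SPEC =====
-- On inputs where no word has a repeated letter, BOTH Pythons A and B return the identical
-- int -1 (they agree there too, see the cited examples); but -1 is an int, not a str, so the
-- String-typed ports cannot express that value and the type convention forces Pre_ to exclude
-- exactly those inputs — the exclusion marks an unmatchable-in-type value, not a disagreement.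
def Pre_SearchingChallenge (str : String) : Prop :=
  ∃ w ∈ PySem.Str.split₀ str, ¬ ((w.toList.filter PySem.Chars.isalpha).map PySem.Chars.lowerChar).Nodup
instance (str : String) : Decidable (Pre_SearchingChallenge str) := by unfold Pre_SearchingChallenge; infer_instance

def pvWitness_SearchingChallenge : String := "hello world"

def Spec_SearchingChallenge (str : String) (out : String) : Prop := out = SearchingChallenge_alt str
instance (str : String) (out : String) : Decidable (Spec_SearchingChallenge str out) := by unfold Spec_SearchingChallenge; infer_instance

-- ===== CLAIM (what is proved, stated in full; the proofs are below) =====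
def Claim_equal_SearchingChallenge : Prop := ∀ (str : String), Dom_SearchingChallenge str → Pre_SearchingChallenge str → Spec_SearchingChallenge str (SearchingChallenge str)

-- ===== LEMMAS AND PROOFS =====

-- A's guarded per-letter update is the unconditional counter update over the filtered, lowercased letters
lemma pvFoldl_filter_map_modify : ∀ (cs : List Char) (d : PySem.Dict Char Int),
    cs.foldl (fun d letter =>
      if PySem.Chars.isalpha letter then
        if d.contains (PySem.Chars.lowerChar letter) then
          d.insert (PySem.Chars.lowerChar letter) (d.getD (PySem.Chars.lowerChar letter) 0 + 1)
        else
          d.insert (PySem.Chars.lowerChar letter) 1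
      else d) d
    = ((cs.filter PySem.Chars.isalpha).map PySem.Chars.lowerChar).foldl
        (fun d c => d.modify c 0 (· + 1)) d := by
  intro cs
  induction cs with
  | nil => intro d; rfl
  | cons c cs ih =>
    intro d
    by_cases h : PySem.Chars.isalpha c
    · simp only [List.foldl_cons, h, if_true, List.filter_cons_of_pos h, List.map_cons]
      rw [ih]
      congr 1
      by_cases hc : d.contains (PySem.Chars.lowerChar c)
      · simp [hc, PySem.Dict.modify]
      · simp only [hc]
        rw [PySem.Dict.modify,
          PySem.Dict.getD_of_not_contains (h := by simpa using hc)]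
        simp
    · simp only [List.foldl_cons, h, List.filter_cons_of_neg (by simpa using h)]
      exact ih d

-- values of the counter dict: one count per distinct letter
lemma pvCounter_values (ls : List Char) :
    ((ls.foldl (fun (d : PySem.Dict Char Int) c => d.modify c 0 (· + 1)) PySem.Dict.empty).values)
      = (PySem.Set.ofList ls).map (fun k => (List.count k ls : Int)) := by
  have hkeys : (ls.foldl (fun (d : PySem.Dict Char Int) c => d.modify c 0 (· + 1)) PySem.Dict.empty).keys
      = PySem.Set.ofList ls := by
    rw [PySem.Dict.keys_foldl_modify]
    rfl
  have hnd : (ls.foldl (fun (d : PySem.Dict Char Int) c => d.modify c 0 (· + 1)) PySem.Dict.empty).keys.Nodup := by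
    rw [hkeys]; exact PySem.Set.nodup_ofList ls
  rw [PySem.Dict.values_eq_map_keys _ hnd 0, hkeys]
  apply List.map_congr_left
  intro k hk
  rw [PySem.Dict.getD_foldl_modify_add_one]
  simp [PySem.Dict.getD_empty]

-- Python max with default 0 is determined by the usual maximum properties
lemma pvMaxD_eq_of {xs : List Int} {v : Int}
    (h0 : xs = [] → v = 0) (hmem : xs ≠ [] → v ∈ xs) (hub : ∀ y ∈ xs, y ≤ v) :
    PySem.List.maxD xs id 0 = v := by
  rcases eq_or_ne xs [] with h | h
  · subst h; rw [h0 rfl]; rfl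
  · rcases hm : PySem.List.max? xs id with _ | m
    · exact absurd ((PySem.List.max?_eq_none_iff xs id).mp hm) h
    · have h1 : m ∈ xs := PySem.List.max?_mem hm
      have h2 : v ≤ m := PySem.List.max?_isMax hm v (hmem h)
      have h3 : m = v := le_antisymm (hub m h1) h2
      simp [PySem.List.maxD, hm, h3]

-- invariant of B's run-scanning fold over a sorted prefix p: prev is the largest letter,
-- cur its multiplicity, best a multiplicity that bounds all multiplicities
def pvInv (p : List Char) (st : Int × Int × Option Char) : Prop :=
  (p = [] ∧ st = (0, 0, none)) ∨
  (∃ c, st.2.2 = some c ∧ c ∈ p ∧ (∀ x ∈ p, x ≤ c) ∧ st.2.1 = (List.count c p : Int) ∧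
    (∃ k ∈ p, st.1 = (List.count k p : Int)) ∧ (∀ k ∈ p, (List.count k p : Int) ≤ st.1))

lemma pvInv_step (p : List Char) (st : Int × Int × Option Char) (c' : Char)
    (hle : ∀ x ∈ p, x ≤ c') (hinv : pvInv p st) : pvInv (p ++ [c']) (pvRunStep st c') := by
  obtain ⟨rfl, rfl⟩ | ⟨c, hprev, hcmem, hcmax, hcur, ⟨k, hkmem, hbest⟩, hub⟩ := hinv
  · right
    exact ⟨c', rfl, by simp, by simp, by simp [pvRunStep], ⟨c', by simp, by simp [pvRunStep]⟩,
      by intro k hk; simp at hk; subst hk; simp [pvRunStep]⟩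
  · right
    obtain ⟨b, cur, prev⟩ := st
    simp only at hprev hcur hbest hub ⊢
    subst hprev
    have hcnt_other : ∀ k', k' ≠ c' → (List.count k' (p ++ [c']) : Int) = (List.count k' p : Int) := by
      intro k' hk'
      have h0 : List.count k' [c'] = 0 := by
        simp [List.count_eq_zero, hk']
      simp [List.count_append, h0]
    by_cases hc : c' = c
    · subst hc
      have hstep : pvRunStep (b, cur, some c') c' =
          ((if cur + 1 > b then cur + 1 else b), cur + 1, some c') := by
        simp [pvRunStep]
      rw [hstep]
      have hcnt : (List.count c' (p ++ [c']) : Int) = cur + 1 := by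
        simp [List.count_append, hcur]
      refine ⟨c', rfl, by simp [hcmem], ?_, by simpa using hcnt.symm, ?_, ?_⟩
      · intro x hx
        rcases List.mem_append.mp hx with hx | hx
        · exact hle x hx
        · simp at hx; simp [hx]
      · by_cases hgt : cur + 1 > b
        · exact ⟨c', by simp, by rw [if_pos hgt]; exact hcnt.symm⟩
        · refine ⟨k, List.mem_append_left _ hkmem, ?_⟩
          have hkc : k ≠ c' := by
            rintro rfl
            have h1 : (List.count k p : Int) ≤ b := hub k hkmem
            omega
          rw [if_neg hgt, hcnt_other k hkc]
          exact hbest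
      · intro k' hk'
        by_cases hkc : k' = c'
        · subst hkc
          rw [hcnt]
          split <;> omega
        · rw [hcnt_other k' hkc]
          have := hub k' (by rcases List.mem_append.mp hk' with h | h; exact h; simp at h; exact absurd h hkc)
          split <;> omega
    · have hnot : c' ∉ p := by
        intro hmem
        exact hc (le_antisymm (hcmax c' hmem) (hle c hcmem))
      have hc1 : (1:Int) ≤ (List.count c p : Int) := by
        exact_mod_cast List.one_le_count_iff.mpr hcmem
      have hstep : pvRunStep (b, cur, some c) c' = (b, 1, some c') := by
        have hne : (some c' == some c) = false := by simp [hc]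
        have hb1 : ¬ ((1:Int) > b) := by
          have := hub c hcmem
          omega
        simp [pvRunStep, hne, hb1]
      rw [hstep]
      have hcnt : (List.count c' (p ++ [c']) : Int) = 1 := by
        have : List.count c' p = 0 := List.count_eq_zero.mpr hnot
        simp [List.count_append, this]
      refine ⟨c', rfl, by simp, ?_, hcnt.symm, ⟨k, List.mem_append_left _ hkmem, ?_⟩, ?_⟩
      · intro x hx
        rcases List.mem_append.mp hx with hx | hx
        · exact hle x hx
        · simp at hx; simp [hx]
      · have hkc : k ≠ c' := fun h => hnot (h ▸ hkmem)
        rw [hcnt_other k hkc]; exact hbest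
      · intro k' hk'
        by_cases hkc : k' = c'
        · subst hkc; rw [hcnt]
          have := hub c hcmem
          omega
        · rw [hcnt_other k' hkc]
          exact hub k' (by rcases List.mem_append.mp hk' with h | h; exact h; simp at h; exact absurd h hkc)

lemma pvRun_inv : ∀ (q p : List Char) (st : Int × Int × Option Char),
    (p ++ q).Pairwise (· ≤ ·) → pvInv p st → pvInv (p ++ q) (q.foldl pvRunStep st) := by
  intro q
  induction q with
  | nil => intro p st _ h; simpa using h
  | cons c' q' ih =>
    intro p st hp hinv
    have hle : ∀ x ∈ p, x ≤ c' := by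
      have := (List.pairwise_append.mp hp).2.2
      intro x hx
      exact this x hx c' (by simp)
    have hstep := pvInv_step p st c' hle hinv
    have hp' : ((p ++ [c']) ++ q').Pairwise (· ≤ ·) := by
      simpa [List.append_assoc] using hp
    have := ih (p ++ [c']) (pvRunStep st c') hp' hstep
    simpa [List.append_assoc] using this

-- per-word core: the max letter multiplicity is the longest run of the sorted letters
lemma pvCounts_eq_bestRun (ls : List Char) :
    PySem.List.maxD ((PySem.Set.ofList ls).map (fun k => (List.count k ls : Int))) id 0
      = pvBestRun (PySem.List.sorted ls id) := by
  rcases eq_or_ne ls [] with rfl | hne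
  · rfl
  · have hperm : (PySem.List.sorted ls id).Perm ls := PySem.List.sorted_perm ls id false
    have hpair : (PySem.List.sorted ls id).Pairwise (· ≤ ·) := by
      simpa using PySem.List.sorted_pairwise ls id
    have hinv : pvInv (PySem.List.sorted ls id)
        ((PySem.List.sorted ls id).foldl pvRunStep (0, 0, none)) := by
      have := pvRun_inv (PySem.List.sorted ls id) [] (0, 0, none) (by simpa using hpair)
        (Or.inl ⟨rfl, rfl⟩)
      simpa using this
    have hsne : PySem.List.sorted ls id ≠ [] := by
      intro h
      apply hne
      have := hperm
      rw [h] at this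
      exact (this.symm.eq_nil)
    rcases hinv with ⟨h1, _⟩ | ⟨c, _, hcmem, _, _, ⟨k, hkmem, hbest⟩, hub⟩
    · exact absurd h1 hsne
    · apply pvMaxD_eq_of
      · intro hxs
        exfalso
        have hk1 : k ∈ ls := hperm.mem_iff.mp hkmem
        have hk2 : k ∈ PySem.Set.ofList ls := (PySem.Set.mem_ofList ls k).mpr hk1
        simp [List.map_eq_nil_iff] at hxs
        simp [hxs] at hk2
      · intro _
        have hkls : k ∈ ls := hperm.mem_iff.mp hkmem
        have hv : pvBestRun (PySem.List.sorted ls id) = (List.count k ls : Int) := by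
          rw [pvBestRun, hbest, hperm.count_eq]
        rw [hv]
        exact List.mem_map.mpr ⟨k, (PySem.Set.mem_ofList ls k).mpr hkls, rfl⟩
      · intro y hy
        obtain ⟨k', hk', rfl⟩ := List.mem_map.mp hy
        have hk'ls : k' ∈ ls := (PySem.Set.mem_ofList ls k').mp hk'
        have hb : (List.count k' (PySem.List.sorted ls id) : Int) ≤ pvBestRun (PySem.List.sorted ls id) :=
          hub k' (hperm.mem_iff.mpr hk'ls)
        rwa [hperm.count_eq] at hb

-- per-word agreement between the two ports' inner computations
lemma pvWord_eq (cs : List Char) :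
    PySem.List.maxD (pvLetterDict cs).values id 0
      = pvBestRun (PySem.List.sorted ((cs.filter PySem.Chars.isalpha).map PySem.Chars.lowerChar) id) := by
  rw [pvLetterDict, pvFoldl_filter_map_modify, pvCounter_values, pvCounts_eq_bestRun]

lemma pvMain (str : String) : SearchingChallenge str = SearchingChallenge_alt str := by
  rw [SearchingChallenge, SearchingChallenge_alt]
  have hfun : (fun (st : Int × String) word =>
      let maxCount := PySem.List.maxD (pvLetterDict word.toList).values id 0
      if maxCount > st.1 then (maxCount, word) else st)
    = (fun (st : Int × String) word =>
      let best := pvBestRun (PySem.List.sorted ((word.toList.filter PySem.Chars.isalpha).map PySem.Chars.lowerChar) id)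
      if best > st.1 then (best, word) else st) := by
    funext st word
    simp only [pvWord_eq]
  rw [hfun]

-- ===== VERDICT (by name: the statement is the Claim_ definition above) =====
theorem SearchingChallenge_spec : Claim_equal_SearchingChallenge := by
  intro str _ _
  exact pvMain str
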